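-- pv_equiv track=rewrite | github.com/AWeirdDev/flights | test_upstream_extraction.py | analyze_field_coverage
-- ===== SOURCE A (Python) =====
-- def analyze_field_coverage(flights):
--     """Analyze which fields have data"""
--     field_counts = {
--         'name': 0,
--         'departure_time': 0,
--         'arrival_time': 0,
--         'arrival_time_ahead': 0,
--         'duration': 0,
--         'stops': 0,
--         'delay': 0,
--         'price': 0
--     }
--
--     field_samples = {field: [] for field in field_counts}
--
--     for flight in flights:
--         for field in field_counts:
--             if flight.get(field) and flight[field].strip():
--                 field_counts[field] += 1
--                 if len(field_samples[field]) < 3: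
--                     field_samples[field].append(flight[field])
--
--     return field_counts, field_samples
-- ===== SOURCE B (Python) =====
-- FIELDS = ['name', 'departure_time', 'arrival_time', 'arrival_time_ahead',
--           'duration', 'stops', 'delay', 'price']
--
--
-- def _has_data(flight, field):
--     value = flight.get(field)
--     return bool(value) and bool(value.strip())
--
--
-- def analyze_field_coverage(flights):
--     """Analyze which fields have data"""
--     field_counts = {f: sum(1 for fl in flights if _has_data(fl, f)) for f in FIELDS}
--     field_samples = {f: [fl[f] for fl in flights if _has_data(fl, f)][:3] for f in FIELDS}
--     return field_counts, field_samples
-- ===== Notes on version B (the rewrite author's own statement) =====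
-- stated objective: idiomatic
-- what changed: Replaces A's single stateful pass over flights (nested per-flight field loop mutating two accumulator dicts with a guarded append capped at 3) by two dict comprehensions over the fixed field list: each field's count is a sum over its own scan of the flights and its samples are a filtered list comprehension truncated by slicing [:3].
import Mathlib
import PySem

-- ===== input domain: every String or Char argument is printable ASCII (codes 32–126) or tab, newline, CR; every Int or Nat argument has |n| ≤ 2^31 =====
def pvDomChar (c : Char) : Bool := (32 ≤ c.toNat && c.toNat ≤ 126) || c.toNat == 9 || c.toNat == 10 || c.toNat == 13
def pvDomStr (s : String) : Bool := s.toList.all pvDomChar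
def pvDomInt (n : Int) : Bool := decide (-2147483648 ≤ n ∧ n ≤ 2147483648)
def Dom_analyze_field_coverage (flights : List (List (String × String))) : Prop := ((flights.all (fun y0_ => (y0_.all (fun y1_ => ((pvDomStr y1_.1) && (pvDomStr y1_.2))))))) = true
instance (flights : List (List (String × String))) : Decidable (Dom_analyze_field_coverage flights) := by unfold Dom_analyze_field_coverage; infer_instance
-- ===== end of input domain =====

-- B replaces A's single stateful pass over flights by per-field comprehensions over the fixed field list (idiomatic decomposition; same cost).

-- ===== PORT A =====
def analyze_field_coverage (flights : List (List (String × String))) : (List (String × Int)) × (List (String × List String)) :=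
  let field_counts : PySem.Dict String Int :=
    PySem.Dict.mk [("name", 0), ("departure_time", 0), ("arrival_time", 0), ("arrival_time_ahead", 0),
                   ("duration", 0), ("stops", 0), ("delay", 0), ("price", 0)]
  let field_samples : PySem.Dict String (List String) :=
    PySem.Dict.mk (field_counts.keys.map (fun field => (field, ([] : List String))))
  let final := flights.foldl
    (fun (st : PySem.Dict String Int × PySem.Dict String (List String)) flight =>
      st.1.keys.foldl
        (fun st field =>
          match (PySem.Dict.mk flight).get? field with
          | some v =>
              if v != "" && PySem.Str.strip v != "" then
                let counts := st.1.modify field 0 (· + 1)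
                let samples :=
                  if (st.2.getD field []).length < 3 then st.2.modify field [] (· ++ [v]) else st.2
                (counts, samples)
              else st
          | none => st)
        st)
    (field_counts, field_samples)
  (final.1.items, final.2.items)

-- ===== PORT B =====
def pvFields : List String :=
  ["name", "departure_time", "arrival_time", "arrival_time_ahead", "duration", "stops", "delay", "price"]

def pvHasData (flight : List (String × String)) (field : String) : Bool :=
  match (PySem.Dict.mk flight).get? field with
  | some v => (v != "") && (PySem.Str.strip v != "")
  | none => false

def analyze_field_coverage_alt (flights : List (List (String × String))) : (List (String × Int)) × (List (String × List String)) :=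
  (pvFields.map (fun f =>
      (f, flights.foldl (fun acc fl => if pvHasData fl f then acc + 1 else acc) (0 : Int))),
   pvFields.map (fun f =>
      (f, (flights.filterMap (fun fl => if pvHasData fl f then (PySem.Dict.mk fl).get? f else none)).take 3)))

-- ===== PRECONDITION & SPEC =====
def Spec_analyze_field_coverage (flights : List (List (String × String))) (out : (List (String × Int)) × (List (String × List String))) : Prop := out = analyze_field_coverage_alt flights
instance (flights : List (List (String × String))) (out : (List (String × Int)) × (List (String × List String))) : Decidable (Spec_analyze_field_coverage flights out) := by unfold Spec_analyze_field_coverage; infer_instance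

-- ===== CLAIM (what is proved, stated in full; the proofs are below) =====
def Claim_equal_analyze_field_coverage : Prop := ∀ (flights : List (List (String × String))), Dom_analyze_field_coverage flights → Spec_analyze_field_coverage flights (analyze_field_coverage flights)

-- ===== LEMMAS AND PROOFS =====

-- count of flights in p with data for f, as B computes it
def pvCnt (p : List (List (String × String))) (f : String) : Int :=
  p.foldl (fun acc fl => if pvHasData fl f then acc + 1 else acc) 0

-- the values of field f over p, as B collects them (before truncation)
def pvVals (p : List (List (String × String))) (f : String) : List String :=
  p.filterMap (fun fl => if pvHasData fl f then (PySem.Dict.mk fl).get? f else none)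

-- the value flight fl holds for field f (meaningful when pvHasData fl f)
def pvValOf (fl : List (String × String)) (f : String) : String :=
  ((PySem.Dict.mk fl).get? f).getD ""

-- the state of A's loop after processing prefix p
def pvState (p : List (List (String × String))) :
    PySem.Dict String Int × PySem.Dict String (List String) :=
  (PySem.Dict.mk (pvFields.map (fun f => (f, pvCnt p f))),
   PySem.Dict.mk (pvFields.map (fun f => (f, (pvVals p f).take 3))))

lemma pvGet?_mk_map {α : Type} (L : List String) (g : String → α) (k : String) (hk : k ∈ L) :
    (PySem.Dict.mk (L.map (fun x => (x, g x)))).get? k = some (g k) := by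
  induction L with
  | nil => simp at hk
  | cons x L ih =>
      rw [List.map_cons, PySem.Dict.get?_mk_cons]
      by_cases hxk : x = k
      · subst hxk; simp
      · have hkL : k ∈ L := by
          rcases List.mem_cons.mp hk with h | h
          · exact absurd h.symm hxk
          · exact h
        simp [hxk, ih hkL]

lemma pvGetD_mk_map {α : Type} (L : List String) (g : String → α) (k : String) (hk : k ∈ L)
    (dflt : α) : (PySem.Dict.mk (L.map (fun x => (x, g x)))).getD k dflt = g k := by
  simp [PySem.Dict.getD, pvGet?_mk_map L g k hk]

lemma pvModify_mk_map {α : Type} (L : List String) (g : String → α) (k : String) (hk : k ∈ L)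
    (dflt : α) (f : α → α) :
    (PySem.Dict.mk (L.map (fun x => (x, g x)))).modify k dflt f
      = PySem.Dict.mk (L.map (fun x => (x, if x = k then f (g k) else g x))) := by
  have hc : (PySem.Dict.mk (L.map (fun x => (x, g x)))).contains k = true := by
    rw [PySem.Dict.contains_eq_isSome_get?, pvGet?_mk_map L g k hk]; rfl
  unfold PySem.Dict.modify PySem.Dict.insert
  rw [hc]
  simp only [PySem.Dict.getD, pvGet?_mk_map L g k hk, Option.getD_some, if_true]
  congr 1
  simp only [List.map_map]
  refine List.map_congr_left (fun x _ => ?_)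
  by_cases hxk : x = k
  · subst hxk; simp
  · simp [hxk]

lemma pvTake3_snoc {α : Type} (l : List α) (v : α) :
    (l ++ [v]).take 3 = if (l.take 3).length < 3 then l.take 3 ++ [v] else l.take 3 := by
  rcases Nat.lt_or_ge l.length 3 with h | h
  · rw [List.take_of_length_le (le_of_lt h), List.take_of_length_le (by simp; omega)]
    simp [h]
  · rw [List.take_append_of_le_length h]
    simp [List.length_take]
    omega

-- A's inner loop body, written as a single conditional update
lemma pvStepEq (fl : List (String × String)) (field : String)
    (st : PySem.Dict String Int × PySem.Dict String (List String)) :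
    (match (PySem.Dict.mk fl).get? field with
     | some v =>
         if v != "" && PySem.Str.strip v != "" then
           let counts := st.1.modify field 0 (· + 1)
           let samples :=
             if (st.2.getD field []).length < 3 then st.2.modify field [] (· ++ [v]) else st.2
           (counts, samples)
         else st
     | none => st)
    = if pvHasData fl field then
        (st.1.modify field 0 (· + 1),
         if (st.2.getD field []).length < 3 then st.2.modify field [] (· ++ [pvValOf fl field])
         else st.2)
      else st := by
  unfold pvHasData pvValOf
  cases h : (PySem.Dict.mk fl).get? field with
  | none => simp
  | some v =>
      by_cases hv : (v != "" && PySem.Str.strip v != "") = true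
      · simp [hv]
      · simp [hv]

-- the inner loop over a nodup sublist of the fields, acting on a map-shaped state
lemma pvFoldSteps (fl : List (String × String)) (fs : List String) (hnd : fs.Nodup)
    (hsub : ∀ x ∈ fs, x ∈ pvFields) (g : String → Int) (h : String → List String) :
    fs.foldl
      (fun st field =>
        if pvHasData fl field then
          (st.1.modify field 0 (· + 1),
           if (st.2.getD field []).length < 3 then st.2.modify field [] (· ++ [pvValOf fl field])
           else st.2)
        else st)
      (PySem.Dict.mk (pvFields.map (fun x => (x, g x))),
       PySem.Dict.mk (pvFields.map (fun x => (x, h x))))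
    = (PySem.Dict.mk (pvFields.map (fun x => (x, if x ∈ fs ∧ pvHasData fl x then g x + 1 else g x))),
       PySem.Dict.mk (pvFields.map (fun x =>
         (x, if x ∈ fs ∧ pvHasData fl x ∧ (h x).length < 3 then h x ++ [pvValOf fl x] else h x)))) := by
  induction fs generalizing g h with
  | nil => simp
  | cons k fs ih =>
      have hknf : k ∉ fs := (List.nodup_cons.mp hnd).1
      have hndt : fs.Nodup := (List.nodup_cons.mp hnd).2
      have hkF : k ∈ pvFields := hsub k (List.mem_cons_self ..)
      have hsubt : ∀ x ∈ fs, x ∈ pvFields := fun x hx => hsub x (List.mem_cons_of_mem _ hx)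
      rw [List.foldl_cons]
      by_cases hk : pvHasData fl k
      · rw [if_pos hk]
        simp only [pvModify_mk_map pvFields g k hkF, pvGetD_mk_map pvFields h k hkF]
        by_cases hlen : (h k).length < 3
        · rw [if_pos hlen, pvModify_mk_map pvFields h k hkF]
          rw [ih hndt hsubt]
          simp only [Prod.mk.injEq]
          constructor
          · congr 1
            refine List.map_congr_left (fun x hx => ?_)
            by_cases hxk : x = k
            · subst hxk; simp [hknf, hk]
            · simp [hxk, List.mem_cons]
          · congr 1
            refine List.map_congr_left (fun x hx => ?_)
            by_cases hxk : x = k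
            · subst hxk; simp [hknf, hk, hlen]
            · simp [hxk, List.mem_cons]
        · rw [if_neg hlen]
          rw [ih hndt hsubt]
          simp only [Prod.mk.injEq]
          constructor
          · congr 1
            refine List.map_congr_left (fun x hx => ?_)
            by_cases hxk : x = k
            · subst hxk; simp [hknf, hk]
            · simp [hxk, List.mem_cons]
          · congr 1
            refine List.map_congr_left (fun x hx => ?_)
            by_cases hxk : x = k
            · subst hxk; simp [hknf, hk, hlen]
            · simp [hxk, List.mem_cons]
      · rw [if_neg hk]
        rw [ih hndt hsubt]
        simp only [Prod.mk.injEq]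
        constructor
        · congr 1
          refine List.map_congr_left (fun x hx => ?_)
          by_cases hxk : x = k
          · subst hxk; simp [hk]
          · simp [hxk, List.mem_cons]
        · congr 1
          refine List.map_congr_left (fun x hx => ?_)
          by_cases hxk : x = k
          · subst hxk; simp [hk]
          · simp [hxk, List.mem_cons]

lemma pvHasData_get? (fl : List (String × String)) (f : String) (h : pvHasData fl f = true) :
    (PySem.Dict.mk fl).get? f = some (pvValOf fl f) := by
  unfold pvHasData at h
  unfold pvValOf
  cases hh : (PySem.Dict.mk fl).get? f with
  | none => rw [hh] at h; simp at h
  | some v => simp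

lemma pvCnt_snoc (p : List (List (String × String))) (fl : List (String × String)) (f : String) :
    pvCnt (p ++ [fl]) f = if pvHasData fl f then pvCnt p f + 1 else pvCnt p f := by
  simp [pvCnt, List.foldl_append]

lemma pvVals_snoc (p : List (List (String × String))) (fl : List (String × String)) (f : String) :
    pvVals (p ++ [fl]) f = pvVals p f ++ (if pvHasData fl f then [pvValOf fl f] else []) := by
  by_cases h : pvHasData fl f
  · simp [pvVals, List.filterMap_append, h, pvHasData_get? fl f h]
  · simp [pvVals, List.filterMap_append, h]

lemma pvStep (p : List (List (String × String))) (fl : List (String × String)) :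
    (pvState p).1.keys.foldl
      (fun st field =>
        match (PySem.Dict.mk fl).get? field with
        | some v =>
            if v != "" && PySem.Str.strip v != "" then
              let counts := st.1.modify field 0 (· + 1)
              let samples :=
                if (st.2.getD field []).length < 3 then st.2.modify field [] (· ++ [v]) else st.2
              (counts, samples)
            else st
        | none => st)
      (pvState p) = pvState (p ++ [fl]) := by
  have hkeys : (pvState p).1.keys = pvFields := by
    simp only [pvState, PySem.Dict.keys, List.map_map]
    have hid : ((fun (x : String × Int) => x.1) ∘ fun f => (f, pvCnt p f)) = id := rfl
    rw [hid, List.map_id]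
  have hfn : (fun (st : PySem.Dict String Int × PySem.Dict String (List String)) (field : String) =>
      match (PySem.Dict.mk fl).get? field with
      | some v =>
          if v != "" && PySem.Str.strip v != "" then
            let counts := st.1.modify field 0 (· + 1)
            let samples :=
              if (st.2.getD field []).length < 3 then st.2.modify field [] (· ++ [v]) else st.2
            (counts, samples)
          else st
      | none => st)
      = (fun st field =>
          if pvHasData fl field then
            (st.1.modify field 0 (· + 1),
             if (st.2.getD field []).length < 3 then st.2.modify field [] (· ++ [pvValOf fl field])
             else st.2)
          else st) := funext fun st => funext fun field => pvStepEq fl field st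
  rw [hkeys, hfn]
  show pvFields.foldl _ (PySem.Dict.mk (pvFields.map (fun f => (f, pvCnt p f))),
        PySem.Dict.mk (pvFields.map (fun f => (f, (pvVals p f).take 3)))) = _
  rw [pvFoldSteps fl pvFields (by decide) (fun x hx => hx) (pvCnt p)
        (fun f => (pvVals p f).take 3)]
  unfold pvState
  simp only [Prod.mk.injEq]
  constructor
  · congr 1
    refine List.map_congr_left (fun x hx => ?_)
    rw [pvCnt_snoc]
    simp [hx]
  · congr 1
    refine List.map_congr_left (fun x hx => ?_)
    rw [pvVals_snoc]
    by_cases h : pvHasData fl x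
    · simp only [h, if_true]
      rw [pvTake3_snoc]
      simp [hx]
    · simp [h]

lemma pvLoop (rest p : List (List (String × String))) :
    rest.foldl
      (fun (st : PySem.Dict String Int × PySem.Dict String (List String)) flight =>
        st.1.keys.foldl
          (fun st field =>
            match (PySem.Dict.mk flight).get? field with
            | some v =>
                if v != "" && PySem.Str.strip v != "" then
                  let counts := st.1.modify field 0 (· + 1)
                  let samples :=
                    if (st.2.getD field []).length < 3 then st.2.modify field [] (· ++ [v]) else st.2
                  (counts, samples)
                else st
            | none => st)
          st)
      (pvState p) = pvState (p ++ rest) := by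
  induction rest generalizing p with
  | nil => simp
  | cons fl rest ih =>
      simp only [List.foldl_cons, pvStep p fl]
      rw [ih (p ++ [fl])]
      simp

-- ===== VERDICT (by name: the statement is the Claim_ definition above) =====
theorem analyze_field_coverage_spec : Claim_equal_analyze_field_coverage := by
  intro flights _
  unfold Spec_analyze_field_coverage analyze_field_coverage analyze_field_coverage_alt
  have h0 : (PySem.Dict.mk [("name", (0:Int)), ("departure_time", 0), ("arrival_time", 0), ("arrival_time_ahead", 0),
                   ("duration", 0), ("stops", 0), ("delay", 0), ("price", 0)],
             PySem.Dict.mk (((PySem.Dict.mk [("name", (0:Int)), ("departure_time", 0), ("arrival_time", 0), ("arrival_time_ahead", 0),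
                   ("duration", 0), ("stops", 0), ("delay", 0), ("price", 0)]).keys).map (fun field => (field, ([] : List String)))))
      = pvState [] := by
    simp [pvState, pvFields, pvCnt, pvVals, PySem.Dict.keys]
  simp only [h0, pvLoop flights []]
  simp [pvState, pvCnt, pvVals, pvFields]
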